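-- pv_equiv track=rewrite | github.com/Yobretaw/AlgorithmProblems | EPI/DynamicProgramming/17_15_pick_up_coins_for_max_gain.py | max_assigments_help
-- ===== SOURCE A (Python) =====
-- def max_assigments_help(A, B, idx, d):
--     if idx < 0:
--         return 0
--
--     if idx == 0:
--         return max(A[0], B[0], 0)
--
--     if idx in d:
--         return d[idx]
--
--     take_A_idx = A[idx] + max_assigments_help(A, B, idx - 2, d)
--     not_take_A_idx = max(B[idx], 0) + max_assigments_help(A, B, idx - 1, d)
--
--     d[idx] = max(take_A_idx, not_take_A_idx)
--     return d[idx]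
-- ===== SOURCE B (Python) =====
-- def max_assigments_help(A, B, idx, d):
--     if idx < 0:
--         return 0
--     if idx == 0:
--         return max(A[0], B[0], 0)
--     if idx in d:
--         return d[idx]
--
--     def val(j):
--         if j < 0:
--             return 0
--         if j == 0:
--             return max(A[0], B[0], 0)
--         return d[j]
--
--     for i in range(1, idx + 1):
--         if i not in d:
--             d[i] = max(A[i] + val(i - 2), max(B[i], 0) + val(i - 1))
--     return d[idx]
-- ===== Notes on version B (the rewrite author's own statement) =====
-- stated objective: alternative
-- what changed: Replaces the top-down memoized recursion by a bottom-up iterative DP loop that fills the memo dict for i = 1..idx, honouring already-cached entries; same O(idx) cost without Python recursion depth.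
import Mathlib
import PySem

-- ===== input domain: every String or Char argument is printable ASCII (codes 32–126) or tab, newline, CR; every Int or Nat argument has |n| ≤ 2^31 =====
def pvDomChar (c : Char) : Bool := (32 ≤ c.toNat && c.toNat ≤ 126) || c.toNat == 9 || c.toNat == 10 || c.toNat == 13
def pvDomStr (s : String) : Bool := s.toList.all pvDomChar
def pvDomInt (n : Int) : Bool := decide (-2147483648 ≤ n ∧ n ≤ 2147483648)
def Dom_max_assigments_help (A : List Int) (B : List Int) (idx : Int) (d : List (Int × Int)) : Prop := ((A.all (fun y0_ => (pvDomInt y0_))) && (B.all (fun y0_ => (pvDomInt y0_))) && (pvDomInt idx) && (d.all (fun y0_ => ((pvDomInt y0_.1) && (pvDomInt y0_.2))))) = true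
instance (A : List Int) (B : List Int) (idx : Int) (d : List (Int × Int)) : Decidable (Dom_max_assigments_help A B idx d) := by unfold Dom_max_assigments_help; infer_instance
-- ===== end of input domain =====

-- B replaces A's top-down memoized recursion by a bottom-up loop filling the memo for i = 1..idx
-- (same O(idx) cost; honours cached entries). Return values are proved equal; as a side effect B may
-- populate memo keys below a cached entry that A's recursion never visits (return-value equivalence only).

-- ===== PORT A =====
-- recursion carrying the mutated memo dict as threaded state; pyGetD is exact on Pre_ (indices in range)
def pvGoA (A : List Int) (B : List Int) (idx : Int) (d : PySem.Dict Int Int) :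
    Int × PySem.Dict Int Int :=
  if idx < 0 then (0, d)
  else if idx = 0 then
    (max (max (PySem.List.pyGetD A 0 0) (PySem.List.pyGetD B 0 0)) 0, d)
  else if d.contains idx then (d.getD idx 0, d)
  else
    let r2 := pvGoA A B (idx - 2) d
    let take_A_idx := PySem.List.pyGetD A idx 0 + r2.1
    let r1 := pvGoA A B (idx - 1) r2.2
    let not_take_A_idx := max (PySem.List.pyGetD B idx 0) 0 + r1.1
    let v := max take_A_idx not_take_A_idx
    (v, r1.2.insert idx v)
  termination_by idx.toNat
  decreasing_by all_goals omega

def max_assigments_help (A : List Int) (B : List Int) (idx : Int) (d : List (Int × Int)) : Int :=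
  (pvGoA A B idx (PySem.Dict.mk d)).1

-- ===== PORT B =====
def max_assigments_help_alt (A : List Int) (B : List Int) (idx : Int) (d : List (Int × Int)) : Int :=
  if idx < 0 then 0
  else if idx = 0 then
    max (max (PySem.List.pyGetD A 0 0) (PySem.List.pyGetD B 0 0)) 0
  else
    let D0 : PySem.Dict Int Int := PySem.Dict.mk d
    if D0.contains idx then D0.getD idx 0
    else
      -- val j: value of the DP at j, reading already-filled memo entries for j ≥ 1
      let val : PySem.Dict Int Int → Int → Int := fun D j =>
        if j < 0 then 0
        else if j = 0 then
          max (max (PySem.List.pyGetD A 0 0) (PySem.List.pyGetD B 0 0)) 0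
        else D.getD j 0
      let Df := (PySem.List.pyRange 1 (idx + 1) 1).foldl
        (fun D i =>
          if D.contains i then D
          else D.insert i (max (PySem.List.pyGetD A i 0 + val D (i - 2))
                               (max (PySem.List.pyGetD B i 0) 0 + val D (i - 1)))) D0
      Df.getD idx 0

-- ===== PRECONDITION & SPEC =====
-- Pre_ excludes exactly the inputs on which the Python A raises an IndexError:
-- idx ≥ 0 requires A[idx]/B[idx] (or A[0]/B[0] when idx = 0) unless the positive idx is already cached in d.
def Pre_max_assigments_help (A : List Int) (B : List Int) (idx : Int) (d : List (Int × Int)) : Prop :=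
  idx < 0 ∨ (idx = 0 ∧ A ≠ [] ∧ B ≠ []) ∨
    (0 < idx ∧ (idx ∈ d.map Prod.fst ∨ (idx < (A.length : Int) ∧ idx < (B.length : Int))))
instance (A : List Int) (B : List Int) (idx : Int) (d : List (Int × Int)) : Decidable (Pre_max_assigments_help A B idx d) := by unfold Pre_max_assigments_help; infer_instance

def pvWitness_max_assigments_help : List Int × List Int × Int × (List (Int × Int)) :=
  ([1, -2, 3], [2, 1, -1], 2, [])

def Spec_max_assigments_help (A : List Int) (B : List Int) (idx : Int) (d : List (Int × Int)) (out : Int) : Prop := out = max_assigments_help_alt A B idx d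
instance (A : List Int) (B : List Int) (idx : Int) (d : List (Int × Int)) (out : Int) : Decidable (Spec_max_assigments_help A B idx d out) := by unfold Spec_max_assigments_help; infer_instance

-- ===== CLAIM (what is proved, stated in full; the proofs are below) =====
def Claim_equal_max_assigments_help : Prop := ∀ (A : List Int) (B : List Int) (idx : Int) (d : List (Int × Int)), Dom_max_assigments_help A B idx d → Pre_max_assigments_help A B idx d → Spec_max_assigments_help A B idx d (max_assigments_help A B idx d)

-- ===== LEMMAS AND PROOFS =====

-- the pure memo-free value of the recurrence over the INITIAL dict d0
def pvF (A : List Int) (B : List Int) (d0 : PySem.Dict Int Int) (idx : Int) : Int :=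
  if idx < 0 then 0
  else if idx = 0 then
    max (max (PySem.List.pyGetD A 0 0) (PySem.List.pyGetD B 0 0)) 0
  else if d0.contains idx then d0.getD idx 0
  else max (PySem.List.pyGetD A idx 0 + pvF A B d0 (idx - 2))
           (max (PySem.List.pyGetD B idx 0) 0 + pvF A B d0 (idx - 1))
  termination_by idx.toNat
  decreasing_by all_goals omega

-- d is d0 plus entries at keys absent from d0 carrying their pvF value
def pvExt (A : List Int) (B : List Int) (d0 d : PySem.Dict Int Int) : Prop :=
  ∀ k : Int, d.get? k = d0.get? k ∨ (d0.get? k = none ∧ d.get? k = some (pvF A B d0 k))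

theorem pvF_neg (A B : List Int) (d0 : PySem.Dict Int Int) (idx : Int) (h : idx < 0) :
    pvF A B d0 idx = 0 := by rw [pvF, if_pos h]

theorem pvF_zero (A B : List Int) (d0 : PySem.Dict Int Int) :
    pvF A B d0 0 = max (max (PySem.List.pyGetD A 0 0) (PySem.List.pyGetD B 0 0)) 0 := by
  rw [pvF]; norm_num

theorem pvF_cached (A B : List Int) (d0 : PySem.Dict Int Int) (idx : Int)
    (h1 : ¬ idx < 0) (h0 : ¬ idx = 0) (hc : d0.contains idx = true) :
    pvF A B d0 idx = d0.getD idx 0 := by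
  rw [pvF, if_neg h1, if_neg h0, if_pos hc]

theorem pvF_rec (A B : List Int) (d0 : PySem.Dict Int Int) (idx : Int)
    (h1 : ¬ idx < 0) (h0 : ¬ idx = 0) (hc : d0.contains idx = false) :
    pvF A B d0 idx = max (PySem.List.pyGetD A idx 0 + pvF A B d0 (idx - 2))
      (max (PySem.List.pyGetD B idx 0) 0 + pvF A B d0 (idx - 1)) := by
  rw [pvF, if_neg h1, if_neg h0, if_neg (by simp [hc])]

theorem pvExt_refl (A B : List Int) (d0 : PySem.Dict Int Int) : pvExt A B d0 d0 :=
  fun _ => Or.inl rfl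

theorem pvExt_get?_none (A B : List Int) {d0 d : PySem.Dict Int Int} (h : pvExt A B d0 d)
    {k : Int} (hk : d.get? k = none) : d0.get? k = none := by
  rcases h k with h1 | ⟨h1, h2⟩
  · rw [← h1]; exact hk
  · rw [hk] at h2; exact absurd h2 (by simp)

theorem pvExt_getD (A B : List Int) {d0 d : PySem.Dict Int Int} (h : pvExt A B d0 d)
    {k : Int} (hk : d.contains k = true) (hk1 : ¬ k < 0) (hk0 : ¬ k = 0) :
    d.getD k 0 = pvF A B d0 k := by
  rw [PySem.Dict.contains_eq_isSome_get?] at hk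
  rcases h k with h1 | ⟨h1, h2⟩
  · have hc0 : d0.contains k = true := by
      rw [PySem.Dict.contains_eq_isSome_get?, ← h1]; exact hk
    rw [pvF_cached A B d0 k hk1 hk0 hc0,
      PySem.Dict.getD_eq_get?_getD, PySem.Dict.getD_eq_get?_getD, h1]
  · rw [PySem.Dict.getD_eq_get?_getD, h2, Option.getD_some]

theorem pvExt_insert (A B : List Int) {d0 d : PySem.Dict Int Int} (h : pvExt A B d0 d)
    {k : Int} (hk : d0.get? k = none) : pvExt A B d0 (d.insert k (pvF A B d0 k)) := by
  intro j
  rcases eq_or_ne j k with rfl | hne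
  · exact Or.inr ⟨hk, PySem.Dict.get?_insert_self _ _ _⟩
  · rw [PySem.Dict.get?_insert_of_ne _ _ hne]; exact h j

theorem pvNot_contains_get?_none {d : PySem.Dict Int Int} {k : Int}
    (hc : ¬ d.contains k = true) : d.get? k = none := by
  rw [PySem.Dict.contains_eq_isSome_get?] at hc
  cases h : d.get? k with
  | none => rfl
  | some v => rw [h] at hc; simp at hc

-- A's recursion computes pvF and preserves pvExt
theorem pvGoA_spec (A B : List Int) (d0 : PySem.Dict Int Int) :
    ∀ (n : Nat) (idx : Int), idx.toNat ≤ n → ∀ d : PySem.Dict Int Int, pvExt A B d0 d →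
      (pvGoA A B idx d).1 = pvF A B d0 idx ∧ pvExt A B d0 (pvGoA A B idx d).2 := by
  intro n
  induction n with
  | zero =>
    intro idx hn d hd
    have h : idx ≤ 0 := by omega
    rcases lt_or_eq_of_le h with h1 | h1
    · rw [pvGoA, if_pos h1, pvF_neg A B d0 idx h1]; exact ⟨rfl, hd⟩
    · rw [pvGoA, if_neg (by omega), if_pos h1, h1, pvF_zero]; exact ⟨rfl, hd⟩
  | succ n ih =>
    intro idx hn d hd
    by_cases h1 : idx < 0
    · rw [pvGoA, if_pos h1, pvF_neg A B d0 idx h1]; exact ⟨rfl, hd⟩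
    by_cases h0 : idx = 0
    · rw [pvGoA, if_neg h1, if_pos h0, h0, pvF_zero]; exact ⟨rfl, hd⟩
    by_cases hc : d.contains idx
    · rw [pvGoA, if_neg h1, if_neg h0, if_pos hc]
      exact ⟨pvExt_getD A B hd hc h1 h0, hd⟩
    · have hnone : d.get? idx = none := pvNot_contains_get?_none hc
      have h0none : d0.get? idx = none := pvExt_get?_none A B hd hnone
      have h0c : d0.contains idx = false := by
        rw [PySem.Dict.contains_eq_isSome_get?, h0none]; rfl
      obtain ⟨hv2, hd2⟩ := ih (idx - 2) (by omega) d hd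
      obtain ⟨hv1, hd1⟩ := ih (idx - 1) (by omega) _ hd2
      have hval : max (PySem.List.pyGetD A idx 0 + (pvGoA A B (idx - 2) d).1)
          (max (PySem.List.pyGetD B idx 0) 0 + (pvGoA A B (idx - 1) (pvGoA A B (idx - 2) d).2).1)
          = pvF A B d0 idx := by
        rw [hv2, hv1, pvF_rec A B d0 idx h1 h0 h0c]
      rw [pvGoA, if_neg h1, if_neg h0, if_neg (by simp [hc])]
      refine ⟨hval, ?_⟩
      simpa [hval] using pvExt_insert A B hd1 h0none

-- B's bottom-up loop: after processing 1..m the dict extends D0 with all keys 1..m present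
theorem pvFold_spec (A B : List Int) (D0 : PySem.Dict Int Int) :
    ∀ m : Nat,
      pvExt A B D0 ((PySem.List.pyRange 1 ((m : Int) + 1) 1).foldl
        (fun D i =>
          if D.contains i then D
          else D.insert i (max (PySem.List.pyGetD A i 0 +
                (if i - 2 < 0 then 0
                 else if i - 2 = 0 then
                   max (max (PySem.List.pyGetD A 0 0) (PySem.List.pyGetD B 0 0)) 0
                 else D.getD (i - 2) 0))
              (max (PySem.List.pyGetD B i 0) 0 +
                (if i - 1 < 0 then 0
                 else if i - 1 = 0 then
                   max (max (PySem.List.pyGetD A 0 0) (PySem.List.pyGetD B 0 0)) 0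
                 else D.getD (i - 1) 0)))) D0) ∧
      (∀ j : Int, 1 ≤ j → j ≤ (m : Int) →
        ((PySem.List.pyRange 1 ((m : Int) + 1) 1).foldl
        (fun D i =>
          if D.contains i then D
          else D.insert i (max (PySem.List.pyGetD A i 0 +
                (if i - 2 < 0 then 0
                 else if i - 2 = 0 then
                   max (max (PySem.List.pyGetD A 0 0) (PySem.List.pyGetD B 0 0)) 0
                 else D.getD (i - 2) 0))
              (max (PySem.List.pyGetD B i 0) 0 +
                (if i - 1 < 0 then 0
                 else if i - 1 = 0 then
                   max (max (PySem.List.pyGetD A 0 0) (PySem.List.pyGetD B 0 0)) 0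
                 else D.getD (i - 1) 0)))) D0).contains j = true) := by
  intro m
  induction m with
  | zero =>
    constructor
    · simpa [PySem.List.pyRange_one_eq_nil] using pvExt_refl A B D0
    · intro j hj1 hj2; omega
  | succ m ih =>
    obtain ⟨hExt, hAll⟩ := ih
    have hcast : ((↑(m + 1) : Int) + 1) = ((m : Int) + 1) + 1 := by push_cast; ring
    rw [hcast, PySem.List.pyRange_one_succ_right (by omega),
      List.foldl_append, List.foldl_cons, List.foldl_nil]
    set D := (PySem.List.pyRange 1 ((m : Int) + 1) 1).foldl _ D0 with hD
    -- value of the memo lookup helper equals pvF for already-filled indices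
    have hval : ∀ j : Int, 0 ≤ j → j ≤ (m : Int) →
        (if j < 0 then (0 : Int)
         else if j = 0 then
           max (max (PySem.List.pyGetD A 0 0) (PySem.List.pyGetD B 0 0)) 0
         else D.getD j 0) = pvF A B D0 j := by
      intro j hj0 hjm
      by_cases hlt : j < 0
      · omega
      by_cases hz : j = 0
      · rw [if_neg hlt, if_pos hz, hz, pvF_zero]
      · rw [if_neg hlt, if_neg hz]
        exact pvExt_getD A B hExt (hAll j (by omega) hjm) hlt hz
    by_cases hc : D.contains ((m : Int) + 1)
    · rw [if_pos hc]
      refine ⟨hExt, ?_⟩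
      intro j hj1 hj2
      rcases eq_or_lt_of_le hj2 with heq | hlt
      · have hj : j = (m : Int) + 1 := by push_cast at heq; omega
        rw [hj]; exact hc
      · exact hAll j hj1 (by push_cast at hlt ⊢; omega)
    · rw [if_neg hc]
      have h0none : D0.get? ((m : Int) + 1) = none :=
        pvExt_get?_none A B hExt (pvNot_contains_get?_none hc)
      have h0c : D0.contains ((m : Int) + 1) = false := by
        rw [PySem.Dict.contains_eq_isSome_get?, h0none]; rfl
      have hv : max (PySem.List.pyGetD A ((m : Int) + 1) 0 +
            (if (m : Int) + 1 - 2 < 0 then 0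
             else if (m : Int) + 1 - 2 = 0 then
               max (max (PySem.List.pyGetD A 0 0) (PySem.List.pyGetD B 0 0)) 0
             else D.getD ((m : Int) + 1 - 2) 0))
          (max (PySem.List.pyGetD B ((m : Int) + 1) 0) 0 +
            (if (m : Int) + 1 - 1 < 0 then 0
             else if (m : Int) + 1 - 1 = 0 then
               max (max (PySem.List.pyGetD A 0 0) (PySem.List.pyGetD B 0 0)) 0
             else D.getD ((m : Int) + 1 - 1) 0)) = pvF A B D0 ((m : Int) + 1) := by
        rw [pvF_rec A B D0 ((m : Int) + 1) (by omega) (by omega) h0c,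
          hval ((m : Int) + 1 - 1) (by omega) (by omega)]
        by_cases h2 : (m : Int) + 1 - 2 < 0
        · rw [if_pos h2, pvF_neg A B D0 ((m : Int) + 1 - 2) h2]
        · rw [hval ((m : Int) + 1 - 2) (by omega) (by omega)]
      rw [hv]
      refine ⟨pvExt_insert A B hExt h0none, ?_⟩
      intro j hj1 hj2
      rw [PySem.Dict.contains_insert]
      rcases eq_or_lt_of_le hj2 with heq | hlt
      · have : j = (m : Int) + 1 := by push_cast at heq; omega
        simp [this]
      · have := hAll j hj1 (by push_cast at hlt ⊢; omega)
        simp [this]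

-- ===== VERDICT (by name: the statement is the Claim_ definition above) =====
theorem max_assigments_help_spec : Claim_equal_max_assigments_help := by
  intro A B idx d _ _
  unfold Spec_max_assigments_help max_assigments_help max_assigments_help_alt
  by_cases h1 : idx < 0
  · rw [pvGoA, if_pos h1, if_pos h1]
  by_cases h0 : idx = 0
  · rw [pvGoA, if_pos h0]; simp [h0]
  rw [if_neg h1, if_neg h0]
  set D0 : PySem.Dict Int Int := PySem.Dict.mk d with hD0
  by_cases hc : D0.contains idx
  · rw [pvGoA, if_neg h1, if_neg h0, if_pos hc, if_pos hc]
  · rw [if_neg hc]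
    have hA := (pvGoA_spec A B D0 idx.toNat idx (le_refl _) D0 (pvExt_refl A B D0)).1
    obtain ⟨hExt, hAll⟩ := pvFold_spec A B D0 idx.toNat
    have hcast : ((idx.toNat : Int)) = idx := by omega
    rw [hcast] at hExt hAll
    have hcontains : _ := hAll idx (by omega) (le_refl _)
    rw [hA, pvExt_getD A B hExt hcontains h1 h0]
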